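-- pv_equiv track=rewrite | github.com/evilc3/dsa | array_problems.py | alternateNumbers
-- ===== SOURCE A (Python) =====
-- from typing import List
--
-- def alternateNumbers(a : List[int]) -> List[int]:
--     # Write your code here.
--
--     ## TC: O(2N) ~ O(N)
--     ## SC: (N/2) + (N/2) = N
--     # ans = []
--     # pos = []
--     # neg = []
--
--     # for i in a:
--     #     if i < 0:
--     #         neg.append(i)
--     #     else:
--     #         pos.append(i)
--
--     # neg_p = 0
--     # pos_p = 0
--     # for i in range(len(a)):
--     #     if i % 2 == 0:
--     #         ans.append(pos[pos_p])
--     #         pos_p += 1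
--     #     else:
--     #         ans.append(neg[neg_p])
--     #         neg_p += 1
--
--     # return ans
--
--     ## TC: O(N)
--     ## SC: O(1)
--
--     ans = [0] * len(a)
--     pos_p = 0
--     neg_p = 1
--
--     for idx, i in enumerate(a):
--
--         if i > 0:
--             if pos_p < len(a):
--                 ans[pos_p] = i
--                 pos_p += 2
--         else:
--             if neg_p < len(a):
--                 ans[neg_p] = i
--                 neg_p += 2
--
--     return ans
-- ===== SOURCE B (Python) =====
-- from typing import List
--
-- def alternateNumbers(a : List[int]) -> List[int]:
--     # Partition once, then build the answer by an index formula (no mutation):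
--     # even slot i gets pos[i//2], odd slot i gets neg[i//2]; missing entries stay 0.
--     pos = [x for x in a if x > 0]
--     neg = [x for x in a if x <= 0]
--     return [
--         (pos[i // 2] if i // 2 < len(pos) else 0) if i % 2 == 0
--         else (neg[i // 2] if i // 2 < len(neg) else 0)
--         for i in range(len(a))
--     ]
-- ===== Notes on version B (the rewrite author's own statement) =====
-- stated objective: simpler
-- what changed: Replaces A's single pass mutating a preallocated array through two bounded write cursors by a partition into positives/non-positives followed by a pure index-formula comprehension (even slot i takes pos[i//2], odd slot i takes neg[i//2], 0 where the list runs out).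
import Mathlib
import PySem

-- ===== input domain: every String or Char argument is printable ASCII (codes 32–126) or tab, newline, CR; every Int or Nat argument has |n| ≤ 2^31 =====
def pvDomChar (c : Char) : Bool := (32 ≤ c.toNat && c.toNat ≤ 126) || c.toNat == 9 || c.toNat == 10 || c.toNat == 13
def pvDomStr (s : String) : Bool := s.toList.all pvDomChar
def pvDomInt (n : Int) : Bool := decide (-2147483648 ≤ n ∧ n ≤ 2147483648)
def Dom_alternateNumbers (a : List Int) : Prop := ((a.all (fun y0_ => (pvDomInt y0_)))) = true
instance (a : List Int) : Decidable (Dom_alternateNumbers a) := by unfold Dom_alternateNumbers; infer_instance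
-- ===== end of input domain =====

-- B replaces A's mutate-through-two-cursors pass by a partition plus a pure index
-- formula; objective: simpler. Neither program mutates its argument.

-- ===== PORT A =====
-- one loop step of A: write a positive at cursor pos_p (even slots) or a
-- non-positive at cursor neg_p (odd slots), skipping when the cursor ran past n
def stepA (n : Nat) (s : List Int × Nat × Nat) (i : Int) : List Int × Nat × Nat :=
  match s with
  | (ans, pos_p, neg_p) =>
    if 0 < i then
      if pos_p < n then (ans.set pos_p i, pos_p + 2, neg_p) else (ans, pos_p, neg_p)
    else
      if neg_p < n then (ans.set neg_p i, pos_p, neg_p + 2) else (ans, pos_p, neg_p)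

def alternateNumbers (a : List Int) : List Int :=
  (a.foldl (stepA a.length) (List.replicate a.length 0, 0, 1)).1

-- ===== PORT B =====
def alternateNumbers_alt (a : List Int) : List Int :=
  let pos := a.filter (fun x => decide (0 < x))
  let neg := a.filter (fun x => decide (x ≤ 0))
  (List.range a.length).map (fun i =>
    if i % 2 = 0 then (if i / 2 < pos.length then pos.getD (i / 2) 0 else 0)
    else (if i / 2 < neg.length then neg.getD (i / 2) 0 else 0))

-- ===== PRECONDITION & SPEC =====
def Spec_alternateNumbers (a : List Int) (out : List Int) : Prop := out = alternateNumbers_alt a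
instance (a : List Int) (out : List Int) : Decidable (Spec_alternateNumbers a out) := by unfold Spec_alternateNumbers; infer_instance

-- ===== CLAIM (what is proved, stated in full; the proofs are below) =====
def Claim_equal_alternateNumbers : Prop := ∀ (a : List Int), Dom_alternateNumbers a → Spec_alternateNumbers a (alternateNumbers a)

-- ===== LEMMAS AND PROOFS =====

-- Invariant of A's loop: after folding the remaining list l from state
-- (ans, p, q) (p the even write cursor, q the odd one), slot j holds the
-- ((j-p)/2)-th positive of l if j is an even offset from p below n and that
-- element exists, symmetrically for non-positives from q, else the old value.
theorem foldA_getElem? (l : List Int) : ∀ (n : Nat) (ans : List Int) (p q j : Nat),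
    ans.length = n → p % 2 = 0 → q % 2 = 1 →
    (l.foldl (stepA n) (ans, p, q)).1[j]? =
      (if p ≤ j ∧ (j - p) % 2 = 0 ∧ j < n ∧ (j - p) / 2 < (l.filter (fun x => decide (0 < x))).length
       then (l.filter (fun x => decide (0 < x)))[(j - p) / 2]?
       else if q ≤ j ∧ (j - q) % 2 = 0 ∧ j < n ∧ (j - q) / 2 < (l.filter (fun x => decide (x ≤ 0))).length
       then (l.filter (fun x => decide (x ≤ 0)))[(j - q) / 2]?
       else ans[j]?) := by
  induction l with
  | nil =>
    intro n ans p q j hlen hp hq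
    simp
  | cons x t ih =>
    intro n ans p q j hlen hp hq
    rw [List.foldl_cons]
    by_cases hx : 0 < x
    · -- positive element: goes to the even cursor
      have hfp : (x :: t).filter (fun x => decide (0 < x))
          = x :: t.filter (fun x => decide (0 < x)) := by simp [hx]
      have hfn : (x :: t).filter (fun x => decide (x ≤ 0))
          = t.filter (fun x => decide (x ≤ 0)) := by
        simp [List.filter_cons]; omega
      rw [hfp, hfn]
      by_cases hpn : p < n
      · have hstep : stepA n (ans, p, q) x = (ans.set p x, p + 2, q) := by
          simp [stepA, hx, hpn]
        rw [hstep, ih n (ans.set p x) (p + 2) q j (by simp [hlen]) (by omega) hq]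
        simp only [List.length_cons]
        split_ifs <;>
          first
          | rfl
          | (exfalso; omega)
          | (rw [show (j - p) / 2 = (j - (p + 2)) / 2 + 1 from by omega,
                 List.getElem?_cons_succ])
          | (have hj0 : j = p := by omega
             subst hj0
             rw [show (j - j) / 2 = 0 from by omega, List.getElem?_cons_zero,
                 List.getElem?_set_self (by omega)])
          | (rw [List.getElem?_set_ne (by omega)])
      · have hstep : stepA n (ans, p, q) x = (ans, p, q) := by
          simp [stepA, hx, hpn]
        rw [hstep, ih n ans p q j hlen hp hq]
        simp only [List.length_cons]
        split_ifs <;> first | rfl | (exfalso; omega)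
    · -- non-positive element: goes to the odd cursor
      have hfp : (x :: t).filter (fun x => decide (0 < x))
          = t.filter (fun x => decide (0 < x)) := by simp [hx]
      have hfn : (x :: t).filter (fun x => decide (x ≤ 0))
          = x :: t.filter (fun x => decide (x ≤ 0)) := by
        simp [List.filter_cons]; omega
      rw [hfp, hfn]
      by_cases hqn : q < n
      · have hstep : stepA n (ans, p, q) x = (ans.set q x, p, q + 2) := by
          simp [stepA, hx, hqn]
        rw [hstep, ih n (ans.set q x) p (q + 2) j (by simp [hlen]) hp (by omega)]
        simp only [List.length_cons]
        split_ifs <;>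
          first
          | rfl
          | (exfalso; omega)
          | (rw [show (j - q) / 2 = (j - (q + 2)) / 2 + 1 from by omega,
                 List.getElem?_cons_succ])
          | (have hj0 : j = q := by omega
             subst hj0
             rw [show (j - j) / 2 = 0 from by omega, List.getElem?_cons_zero,
                 List.getElem?_set_self (by omega)])
          | (rw [List.getElem?_set_ne (by omega)])
      · have hstep : stepA n (ans, p, q) x = (ans, p, q) := by
          simp [stepA, hx, hqn]
        rw [hstep, ih n ans p q j hlen hp hq]
        simp only [List.length_cons]
        split_ifs <;> first | rfl | (exfalso; omega)

theorem alternateNumbers_eq_alt (a : List Int) :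
    alternateNumbers a = alternateNumbers_alt a := by
  apply List.ext_getElem?
  intro j
  set n := a.length with hn
  set pos := a.filter (fun x => decide (0 < x)) with hpos
  set neg := a.filter (fun x => decide (x ≤ 0)) with hneg
  have hB : (alternateNumbers_alt a)[j]? =
      if j < n then some (if j % 2 = 0
        then (if j / 2 < pos.length then pos.getD (j / 2) 0 else 0)
        else (if j / 2 < neg.length then neg.getD (j / 2) 0 else 0)) else none := by
    simp only [alternateNumbers_alt]
    simp only [← hpos, ← hneg, ← hn]
    rw [List.getElem?_map]
    by_cases hj : j < n
    · rw [List.getElem?_range hj, if_pos hj]; rfl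
    · rw [List.getElem?_eq_none (by simp only [List.length_range]; omega), if_neg hj]; rfl
  have hA := foldA_getElem? a n (List.replicate n 0) 0 1 j (by simp) (by omega) (by omega)
  rw [alternateNumbers]
  simp only [← hpos, ← hneg, ← hn] at hA ⊢
  rw [hA, hB]
  simp only [Nat.sub_zero, List.getElem?_replicate]
  by_cases hjn : j < n
  · by_cases he : j % 2 = 0
    · by_cases hk : j / 2 < pos.length
      · have hc : 0 ≤ j ∧ j % 2 = 0 ∧ j < n ∧ j / 2 < pos.length :=
          ⟨Nat.zero_le _, he, hjn, hk⟩
        rw [if_pos hc, List.getElem?_eq_getElem hk, if_pos hjn, if_pos he, if_pos hk,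
            List.getD_eq_getElem _ _ hk]
      · have hc1 : ¬(0 ≤ j ∧ j % 2 = 0 ∧ j < n ∧ j / 2 < pos.length) := by
          intro h; exact hk h.2.2.2
        have hc2 : ¬(1 ≤ j ∧ (j - 1) % 2 = 0 ∧ j < n ∧ (j - 1) / 2 < neg.length) := by
          intro h; omega
        rw [if_neg hc1, if_neg hc2]
        simp only [if_pos hjn, if_pos he, if_neg hk]
    · have hc1 : ¬(0 ≤ j ∧ j % 2 = 0 ∧ j < n ∧ j / 2 < pos.length) := by
        intro h; exact he h.2.1
      by_cases hk : j / 2 < neg.length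
      · have hodd : (j - 1) / 2 = j / 2 := by omega
        have hc2 : 1 ≤ j ∧ (j - 1) % 2 = 0 ∧ j < n ∧ (j - 1) / 2 < neg.length := by
          rw [hodd]; exact ⟨by omega, by omega, hjn, hk⟩
        rw [if_neg hc1, if_pos hc2, hodd, List.getElem?_eq_getElem hk, if_pos hjn,
            if_neg he, if_pos hk, List.getD_eq_getElem _ _ hk]
      · have hc2 : ¬(1 ≤ j ∧ (j - 1) % 2 = 0 ∧ j < n ∧ (j - 1) / 2 < neg.length) := by
          intro h; omega
        rw [if_neg hc1, if_neg hc2]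
        simp only [if_pos hjn, if_neg he, if_neg hk]
  · have hc1 : ¬(0 ≤ j ∧ j % 2 = 0 ∧ j < n ∧ j / 2 < pos.length) := by
      intro h; exact hjn h.2.2.1
    have hc2 : ¬(1 ≤ j ∧ (j - 1) % 2 = 0 ∧ j < n ∧ (j - 1) / 2 < neg.length) := by
      intro h; exact hjn h.2.2.1
    rw [if_neg hc1, if_neg hc2]
    simp only [if_neg hjn]

-- ===== VERDICT (by name: the statement is the Claim_ definition above) =====
theorem alternateNumbers_spec : Claim_equal_alternateNumbers := by
  intro a _
  exact (alternateNumbers_eq_alt a).symm ▸ rfl
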